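-- pv_equiv track=rewrite | github.com/DylanChua2001/kaypoh | webscraping/webscraping.py | dedupe_events
-- ===== SOURCE A (Python) =====
-- def dedupe_events(events):
--     deduped = {}
--     for event in events:
--         event_id = event["activity_id"]
--         existing = deduped.get(event_id)
--         if not existing:
--             deduped[event_id] = event
--             continue
--
--         if existing.get("source_confidence") == "low" and event.get("source_confidence") in {"medium", "high"}:
--             deduped[event_id] = event
--
--     return list(deduped.values())
-- ===== SOURCE B (Python) =====
-- def dedupe_events(events):
--     # Two-phase: group events by activity_id (first-appearance order), then pick one per group.
--     groups = {}
--     for event in events: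
--         groups.setdefault(event["activity_id"], []).append(event)
--
--     result = []
--     for group in groups.values():
--         chosen = group[0]
--         if chosen.get("source_confidence") == "low":
--             for ev in group:
--                 if ev.get("source_confidence") in {"medium", "high"}:
--                     chosen = ev
--                     break
--         result.append(chosen)
--     return result
-- ===== Notes on version B (the rewrite author's own statement) =====
-- stated objective: alternative
-- what changed: A folds events into a dict keeping one winner per id with an in-place overwrite rule; B first groups all events by activity_id and then, per group, picks the first event, upgrading to the first medium/high event only when the first is low.
import Mathlib
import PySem

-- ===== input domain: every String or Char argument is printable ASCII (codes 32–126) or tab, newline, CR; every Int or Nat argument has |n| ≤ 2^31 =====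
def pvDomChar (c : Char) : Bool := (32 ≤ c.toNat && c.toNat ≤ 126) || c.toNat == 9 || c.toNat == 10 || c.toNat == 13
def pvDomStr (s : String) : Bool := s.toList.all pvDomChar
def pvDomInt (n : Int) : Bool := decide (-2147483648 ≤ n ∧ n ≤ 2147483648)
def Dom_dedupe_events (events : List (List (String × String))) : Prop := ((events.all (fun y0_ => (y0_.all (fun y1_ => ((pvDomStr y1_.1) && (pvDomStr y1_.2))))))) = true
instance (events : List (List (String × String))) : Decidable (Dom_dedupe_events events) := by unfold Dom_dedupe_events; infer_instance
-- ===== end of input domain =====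

-- B regroups the events by id in one pass and then picks one representative per group
-- (objective: alternative two-phase decomposition of the same O(n) rule; not claimed faster).

-- shared expression helpers (each is one Python expression both programs evaluate)
-- event["activity_id"] (Pre_ guarantees the key is present, so the "" default is never used)
def pvId (e : List (String × String)) : String :=
  ((PySem.Dict.mk e).get? "activity_id").getD ""
-- event.get("source_confidence") == "low"
def pvLow (e : List (String × String)) : Bool :=
  (PySem.Dict.mk e).get? "source_confidence" == some "low"
-- event.get("source_confidence") in {"medium", "high"}
def pvUp (e : List (String × String)) : Bool :=
  (PySem.Dict.mk e).get? "source_confidence" == some "medium" ||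
    (PySem.Dict.mk e).get? "source_confidence" == some "high"

-- ===== PORT A =====
-- body of A's loop: keep first event per id, overwrite only low → medium/high
def pvAstep (d : PySem.Dict String (List (String × String))) (event : List (String × String)) :
    PySem.Dict String (List (String × String)) :=
  match d.get? (pvId event) with               -- event_id = event["activity_id"]
  | none => d.insert (pvId event) event            -- "if not existing" (None case)
  | some existing =>
    if existing = [] then d.insert (pvId event) event   -- "if not existing" (empty-dict case)
    else if pvLow existing && pvUp event then d.insert (pvId event) event
    else d

def dedupe_events (events : List (List (String × String))) : List (List (String × String)) :=
  (events.foldl pvAstep PySem.Dict.empty).values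

-- ===== PORT B =====
-- body of B's grouping loop: groups.setdefault(event["activity_id"], []).append(event)
def pvBstep (d : PySem.Dict String (List (List (String × String)))) (event : List (String × String)) :
    PySem.Dict String (List (List (String × String))) :=
  d.modify (pvId event) [] (· ++ [event])

-- B's second phase: chosen = group[0], upgraded to the first medium/high event if low
def pvChoose (group : List (List (String × String))) : List (String × String) :=
  let chosen := group.headD []
  if pvLow chosen then (group.find? pvUp).getD chosen else chosen

def dedupe_events_alt (events : List (List (String × String))) : List (List (String × String)) :=
  let groups := events.foldl pvBstep PySem.Dict.empty
  groups.values.map pvChoose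

-- ===== PRECONDITION & SPEC =====
-- Pre_ excludes events without an "activity_id" key: Python A raises KeyError on them.
def Pre_dedupe_events (events : List (List (String × String))) : Prop :=
  ∀ e ∈ events, (PySem.Dict.mk e).contains "activity_id" = true
instance (events : List (List (String × String))) : Decidable (Pre_dedupe_events events) := by
  unfold Pre_dedupe_events; infer_instance

def pvWitness_dedupe_events : (List (List (String × String))) :=
  [[("activity_id", "1"), ("source_confidence", "low")],
   [("activity_id", "2"), ("source_confidence", "high")],
   [("activity_id", "1"), ("source_confidence", "medium")]]

def Spec_dedupe_events (events : List (List (String × String))) (out : List (List (String × String))) : Prop := out = dedupe_events_alt events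
instance (events : List (List (String × String))) (out : List (List (String × String))) : Decidable (Spec_dedupe_events events out) := by unfold Spec_dedupe_events; infer_instance

-- ===== CLAIM (what is proved, stated in full; the proofs are below) =====
def Claim_equal_dedupe_events : Prop := ∀ (events : List (List (String × String))), Dom_dedupe_events events → Pre_dedupe_events events → Spec_dedupe_events events (dedupe_events events)

-- ===== LEMMAS AND PROOFS =====

-- A's per-group update rule, seen as a fold step over one group
def pvStep (c e : List (String × String)) : List (String × String) :=
  if pvLow c && pvUp e then e else c

-- the representative A's loop keeps for a group, computed from the full group
def pvRed (g : List (List (String × String))) : List (String × String) :=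
  match g with
  | [] => []
  | h :: t => t.foldl pvStep h

theorem pvLow_of_pvUp {e : List (String × String)} (h : pvUp e = true) : pvLow e = false := by
  unfold pvLow pvUp at *
  rcases Bool.or_eq_true_iff.mp h with h' | h' <;>
    · rw [beq_iff_eq] at h'; simp [h']

theorem pvUp_of_pvLow {e : List (String × String)} (h : pvLow e = true) : pvUp e = false := by
  unfold pvLow pvUp at *
  rw [beq_iff_eq] at h; simp [h]

theorem foldl_pvStep_of_not_low {c : List (String × String)}
    (t : List (List (String × String))) (hc : pvLow c = false) :
    t.foldl pvStep c = c := by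
  induction t with
  | nil => rfl
  | cons e t ih => simp [pvStep, hc, ih]

theorem foldl_pvStep_eq (t : List (List (String × String))) (h : List (String × String)) :
    t.foldl pvStep h = if pvLow h then (t.find? pvUp).getD h else h := by
  induction t generalizing h with
  | nil => simp
  | cons e t ih =>
    by_cases hl : pvLow h = true
    · by_cases hu : pvUp e = true
      · simp [pvStep, hl, hu, List.find?, foldl_pvStep_of_not_low t (pvLow_of_pvUp hu)]
      · simp only [Bool.not_eq_true] at hu
        simp [pvStep, hl, hu, ih, List.find?]
    · simp only [Bool.not_eq_true] at hl
      simp [hl, pvStep, foldl_pvStep_of_not_low t hl]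

theorem pvRed_mem {g : List (List (String × String))} (hg : g ≠ []) : pvRed g ∈ g := by
  cases g with
  | nil => exact absurd rfl hg
  | cons h t =>
    rw [pvRed, foldl_pvStep_eq]
    split
    · cases hf : t.find? pvUp with
      | none => simp
      | some e => simp [List.mem_cons.mpr (Or.inr (List.mem_of_find?_eq_some hf))]
    · simp

theorem pvRed_eq_pvChoose (g : List (List (String × String))) : pvRed g = pvChoose g := by
  cases g with
  | nil =>
    have : pvLow ([] : List (String × String)) = false := by decide
    simp [pvRed, pvChoose, this]
  | cons h t =>
    rw [pvRed, foldl_pvStep_eq, pvChoose]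
    by_cases hl : pvLow h = true
    · have hu : pvUp h = false := pvUp_of_pvLow hl
      simp [hl, List.find?, hu]
    · simp only [Bool.not_eq_true] at hl
      simp [hl]

theorem pvRed_append (g : List (List (String × String))) (e : List (String × String))
    (hg : g ≠ []) : pvRed (g ++ [e]) = pvStep (pvRed g) e := by
  cases g with
  | nil => exact absurd rfl hg
  | cons h t => simp [pvRed, List.foldl_append]

-- get? through an items list whose values were mapped
theorem get?_mk_map {ν ν' : Type} (l : List (String × ν)) (f : ν → ν') (k : String) :
    (PySem.Dict.mk (l.map (fun p => (p.1, f p.2)))).get? k = ((PySem.Dict.mk l).get? k).map f := by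
  induction l with
  | nil => rfl
  | cons p l ih =>
    obtain ⟨k', v⟩ := p
    simp only [List.map_cons]
    cases hp : (k' == k) <;>
      simp [PySem.Dict.get?_mk_cons, hp, ih]

-- the loop invariant: A's dict is B's grouping dict with every group reduced by pvRed
theorem pv_main (l : List (List (String × String)))
    (d : PySem.Dict String (List (String × String)))
    (g : PySem.Dict String (List (List (String × String))))
    (hl : ∀ e ∈ l, e ≠ [])
    (hdg : d.items = g.items.map (fun p => (p.1, pvRed p.2)))
    (hgrp : ∀ p ∈ g.items, p.2 ≠ [] ∧ ∀ e ∈ p.2, e ≠ [])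
    (hnd : g.keys.Nodup) :
    (l.foldl pvAstep d).items = (l.foldl pvBstep g).items.map (fun p => (p.1, pvRed p.2)) := by
  induction l generalizing d g with
  | nil => simpa using hdg
  | cons e l ih =>
    have he : e ≠ [] := hl e (by simp)
    have hl' : ∀ e' ∈ l, e' ≠ [] := fun e' h => hl e' (by simp [h])
    have hd : d = PySem.Dict.mk (g.items.map (fun p => (p.1, pvRed p.2))) := by
      apply PySem.Dict.ext; simpa using hdg
    have hget : d.get? (pvId e) = (g.get? (pvId e)).map pvRed := by
      rw [hd, get?_mk_map]
    simp only [List.foldl_cons]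
    cases hk : g.get? (pvId e) with
    | none =>
      have hcont : g.contains (pvId e) = false := by
        rw [PySem.Dict.contains_eq_isSome_get?, hk]; rfl
      have hdcont : d.contains (pvId e) = false := by
        rw [PySem.Dict.contains_eq_isSome_get?, hget, hk]; rfl
      have hA : pvAstep d e = d.insert (pvId e) e := by
        unfold pvAstep; rw [hget, hk]; rfl
      have hB : pvBstep g e = g.insert (pvId e) [e] := by
        unfold pvBstep
        show g.insert (pvId e) (g.getD (pvId e) [] ++ [e]) = _
        simp [PySem.Dict.getD_eq_get?_getD, hk]
      rw [hA, hB]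
      apply ih _ _ hl'
      · rw [PySem.Dict.items_insert_of_not_contains d e hdcont,
            PySem.Dict.items_insert_of_not_contains g [e] hcont, List.map_append, hdg]
        rfl
      · intro p hp
        rw [PySem.Dict.items_insert_of_not_contains g [e] hcont] at hp
        rcases List.mem_append.mp hp with h | h
        · exact hgrp p h
        · simp at h; subst h; exact ⟨by simp, by simpa using he⟩
      · exact PySem.Dict.nodup_keys_insert g (pvId e) [e] hnd
    | some grp =>
      have hcont : g.contains (pvId e) = true := by
        rw [PySem.Dict.contains_eq_isSome_get?, hk]; rfl
      have hdcont : d.contains (pvId e) = true := by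
        rw [PySem.Dict.contains_eq_isSome_get?, hget, hk]; rfl
      have hgrpmem : (pvId e, grp) ∈ g.items := PySem.Dict.mem_items_of_get?_eq_some g hk
      have hgrpne : grp ≠ [] := (hgrp _ hgrpmem).1
      have hgrpel : ∀ e' ∈ grp, e' ≠ [] := (hgrp _ hgrpmem).2
      have hexist : pvRed grp ≠ [] := hgrpel _ (pvRed_mem hgrpne)
      have hB : pvBstep g e = g.insert (pvId e) (grp ++ [e]) := by
        unfold pvBstep
        show g.insert (pvId e) (g.getD (pvId e) [] ++ [e]) = _
        simp [PySem.Dict.getD_eq_get?_getD, hk]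
      have hitemsB : (pvBstep g e).items =
          g.items.map (fun p => if p.1 == pvId e then (pvId e, grp ++ [e]) else p) := by
        rw [hB, PySem.Dict.items_insert_of_contains g (grp ++ [e]) hcont]
      have hred : pvRed (grp ++ [e]) = pvStep (pvRed grp) e := pvRed_append grp e hgrpne
      have hgrp' : ∀ p ∈ (pvBstep g e).items, p.2 ≠ [] ∧ ∀ e' ∈ p.2, e' ≠ [] := by
        intro p hp
        rw [hitemsB] at hp
        rcases List.mem_map.mp hp with ⟨q, hq, hqe⟩
        by_cases h : q.1 == pvId e
        · rw [h] at hqe; simp at hqe; subst hqe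
          refine ⟨by simp, ?_⟩
          intro e' he'
          rcases List.mem_append.mp he' with h' | h'
          · exact hgrpel e' h'
          · simp at h'; subst h'; exact he
        · simp only [Bool.not_eq_true] at h
          rw [h] at hqe; simp at hqe; subst hqe; exact hgrp q hq
      have hnd' : (pvBstep g e).keys.Nodup := by
        rw [hB, PySem.Dict.keys_insert_of_contains g (grp ++ [e]) hcont]
        exact hnd
      by_cases hup : (pvLow (pvRed grp) && pvUp e) = true
      · have hA : pvAstep d e = d.insert (pvId e) e := by
          unfold pvAstep; rw [hget, hk]
          simp [hexist, hup]
        rw [hA]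
        apply ih _ _ hl' _ hgrp' hnd'
        rw [PySem.Dict.items_insert_of_contains d e hdcont, hitemsB, hdg,
            List.map_map, List.map_map]
        apply List.map_congr_left
        intro p hp
        by_cases h : p.1 == pvId e
        · simp only [Function.comp, h, if_pos]
          simp [hred, pvStep, hup]
        · simp only [Bool.not_eq_true] at h
          simp [Function.comp, h]
      · simp only [Bool.not_eq_true] at hup
        have hA : pvAstep d e = d := by
          unfold pvAstep; rw [hget, hk]
          simp [hexist, hup]
        rw [hA]
        have hres := ih d (pvBstep g e) hl' ?_ hgrp' hnd'
        · exact hres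
        · rw [hitemsB, hdg, List.map_map]
          apply List.map_congr_left
          intro p hp
          by_cases h : p.1 == pvId e
          · have hpk : p.1 = pvId e := by simpa using h
            have hpg : p.2 = grp := by
              have : g.get? p.1 = some p.2 :=
                PySem.Dict.get?_of_mem_items g (by simpa using hp) hnd
              rw [hpk, hk] at this; simpa using this.symm
            simp [Function.comp, hred, pvStep, hup, hpk, hpg]
          · simp only [Bool.not_eq_true] at h
            simp [Function.comp, h]

-- ===== VERDICT (by name: the statement is the Claim_ definition above) =====
theorem dedupe_events_spec : Claim_equal_dedupe_events := by
  intro events _ hpre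
  unfold Spec_dedupe_events dedupe_events dedupe_events_alt
  have hne : ∀ e ∈ events, e ≠ [] := by
    intro e he h
    have := hpre e he
    subst h
    simp at this
  have h := pv_main events PySem.Dict.empty PySem.Dict.empty hne rfl (by intro p hp; exact absurd hp (by simp [PySem.Dict.empty])) PySem.Dict.nodup_keys_empty
  show (events.foldl pvAstep PySem.Dict.empty).values = _
  simp only [PySem.Dict.values, h, List.map_map]
  apply List.map_congr_left
  intro p _
  simp [Function.comp, pvRed_eq_pvChoose]
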